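-- pv_equiv track=rewrite | github.com/bc-writings/drafts | x-todo-x/cirtidivpar7-chika.py | est_divisible_par7
-- ===== SOURCE A (Python) =====
-- def est_divisible_par7(nbre):
--
--     """
--
--     Cette fonction applique le critere de Chika a nbre, qui est un
--
--     entier qui a entre 2 et 4 chiffres.
--
--     Par exemple pour nbre = 8722. On separe (872,2)
--
--     872+5*2=882. On sépare (88,2)
--
--     On recommance pour 882 en appelant est_divisible_par7_3ch
--
--    88+5*2=98
--
--     Or 98 est divisible par 7
--
--     Elle retourne True si le critere de Chika prouve que le nombre
--
--     est divisible par 7, et False sinon.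
--
--     Precondition : nbre est un entier
--
--     Postcondition : la fonction retourne un booleen
--
--     """
--
--     resultat=nbre
--
--     while resultat>58:
--         unites=resultat%10 #reste de la division par 10
--
--         dizaines=resultat//10 #division entière par 10 donne le quotient entier
--
--         resultat=dizaines+5*unites
--
--     if resultat%7==0:
--
--         return True
--
--     else:
--
--         return False
-- ===== SOURCE B (Python) =====
-- def est_divisible_par7(nbre):
--     return nbre % 7 == 0
-- ===== Notes on version B (the rewrite author's own statement) =====
-- stated objective: simpler
-- what changed: Replaces the Chika-criterion reduction loop with the direct closed-form test nbre % 7 == 0, which is exact because each loop step maps r to a value congruent to 5r mod 7 and 5 is invertible mod 7.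
import Mathlib
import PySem

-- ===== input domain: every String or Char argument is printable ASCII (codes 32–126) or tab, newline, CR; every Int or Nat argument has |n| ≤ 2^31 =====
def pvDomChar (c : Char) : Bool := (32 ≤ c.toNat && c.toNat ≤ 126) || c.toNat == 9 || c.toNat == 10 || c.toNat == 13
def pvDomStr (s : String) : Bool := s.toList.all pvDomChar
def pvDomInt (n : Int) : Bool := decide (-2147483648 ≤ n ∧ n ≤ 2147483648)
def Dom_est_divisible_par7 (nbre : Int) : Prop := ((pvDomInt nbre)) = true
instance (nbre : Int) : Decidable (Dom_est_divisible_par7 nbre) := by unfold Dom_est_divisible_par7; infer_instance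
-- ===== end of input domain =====

-- B replaces A's Chika reduction loop with the equivalent closed-form test nbre % 7 == 0 (simpler).

-- ===== PORT A =====
-- the 'while resultat > 58' loop of A; one step: resultat = resultat//10 + 5*(resultat%10)
def chikaLoop (r : Int) : Int :=
  if h : r > 58 then
    chikaLoop (PySem.Int.floordiv r 10 + 5 * PySem.Int.mod r 10)
  else r
termination_by r.toNat
decreasing_by
  have h10 : (0:Int) < 10 := by norm_num
  rw [PySem.Int.floordiv_eq_ediv_of_pos h10, PySem.Int.mod_eq_emod_of_pos h10]
  have := Int.mul_ediv_add_emod r 10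
  omega

def est_divisible_par7 (nbre : Int) : Bool :=
  if PySem.Int.mod (chikaLoop nbre) 7 = 0 then true else false

-- ===== PORT B =====
def est_divisible_par7_alt (nbre : Int) : Bool :=
  PySem.Int.mod nbre 7 == 0

-- ===== PRECONDITION & SPEC =====
def Spec_est_divisible_par7 (nbre : Int) (out : Bool) : Prop := out = est_divisible_par7_alt nbre
instance (nbre : Int) (out : Bool) : Decidable (Spec_est_divisible_par7 nbre out) := by unfold Spec_est_divisible_par7; infer_instance

-- ===== CLAIM (what is proved, stated in full; the proofs are below) =====
def Claim_equal_est_divisible_par7 : Prop := ∀ (nbre : Int), Dom_est_divisible_par7 nbre → Spec_est_divisible_par7 nbre (est_divisible_par7 nbre)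

-- ===== LEMMAS AND PROOFS =====

-- each loop step preserves divisibility by 7 (5·(10d+u) ≡ d+5u mod 7), so the loop result is ≡-equivalent to the input
theorem chikaLoop_dvd (r : Int) : (7 ∣ chikaLoop r) ↔ (7 ∣ r) := by
  induction r using chikaLoop.induct with
  | case1 r h ih =>
      rw [chikaLoop, dif_pos h, ih]
      have h10 : (0:Int) < 10 := by norm_num
      rw [PySem.Int.floordiv_eq_ediv_of_pos h10, PySem.Int.mod_eq_emod_of_pos h10]
      have := Int.mul_ediv_add_emod r 10
      omega
  | case2 r h =>
      rw [chikaLoop, dif_neg h]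

theorem est_divisible_par7_spec : Claim_equal_est_divisible_par7 := by
  intro nbre _
  show est_divisible_par7 nbre = est_divisible_par7_alt nbre
  unfold est_divisible_par7 est_divisible_par7_alt
  have h1 := PySem.Int.mod_eq_zero_iff_dvd (chikaLoop nbre) 7
  have h2 := PySem.Int.mod_eq_zero_iff_dvd nbre 7
  by_cases hd : (7:Int) ∣ nbre
  · rw [if_pos (h1.mpr ((chikaLoop_dvd nbre).mpr hd))]
    simpa using hd
  · rw [if_neg (fun hc => hd ((chikaLoop_dvd nbre).mp (h1.mp hc)))]
    simpa using hd
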